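-- pv_equiv track=rewrite | github.com/w402116500/workflow_bundle | tools/core/code_image_renderer.py | _prefer_soft_wrap_break
-- ===== SOURCE A (Python) =====
-- CODE_RENDER_WRAP_SOFT_BREAK_CHARS = set(" ,.;:)]}>/\\|=+-*&")
--
-- def _prefer_soft_wrap_break(text: str, hard_break: int) -> int:
--     if hard_break >= len(text):
--         return hard_break
--     min_index = max(1, int(hard_break * 0.6))
--     for idx in range(hard_break - 1, min_index - 1, -1):
--         if text[idx] in CODE_RENDER_WRAP_SOFT_BREAK_CHARS:
--             return idx + 1
--     return hard_break
-- ===== SOURCE B (Python) =====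
-- CODE_RENDER_WRAP_SOFT_BREAK_CHARS = set(" ,.;:)]}>/\\|=+-*&")
--
--
-- def _prefer_soft_wrap_break(text: str, hard_break: int) -> int:
--     if hard_break >= len(text):
--         return hard_break
--     min_index = max(1, int(hard_break * 0.6))
--     if hard_break <= min_index:
--         return hard_break
--     best = max(text.rfind(c, min_index, hard_break)
--                for c in CODE_RENDER_WRAP_SOFT_BREAK_CHARS)
--     return best + 1 if best >= 0 else hard_break
-- ===== Notes on version B (the rewrite author's own statement) =====
-- stated objective: idiomatic
-- what changed: Replaces the backward per-position loop with early return by one str.rfind per soft-break character over the same window, keeping a running max of the found indices.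
import Mathlib
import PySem

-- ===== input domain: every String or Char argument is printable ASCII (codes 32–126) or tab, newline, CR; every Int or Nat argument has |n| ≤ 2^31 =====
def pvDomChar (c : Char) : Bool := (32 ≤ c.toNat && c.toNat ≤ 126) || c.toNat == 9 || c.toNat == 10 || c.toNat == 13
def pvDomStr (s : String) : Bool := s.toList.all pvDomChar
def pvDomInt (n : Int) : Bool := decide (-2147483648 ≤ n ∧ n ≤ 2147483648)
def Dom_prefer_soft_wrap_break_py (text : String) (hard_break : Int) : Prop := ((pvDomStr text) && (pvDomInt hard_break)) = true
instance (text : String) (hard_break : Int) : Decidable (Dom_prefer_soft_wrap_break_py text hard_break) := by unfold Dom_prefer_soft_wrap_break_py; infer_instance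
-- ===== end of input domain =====

-- B replaces A's backward per-position scan (early return on the first soft char) by one rfind
-- per break character over the same window, keeping a running max (idiomatic; return value only).

-- ===== PORT A =====
-- CODE_RENDER_WRAP_SOFT_BREAK_CHARS = set(" ,.;:)]}>/\\|=+-*&")
def softBreakChars : PySem.Set Char := PySem.Set.ofList (" ,.;:)]}>/\\|=+-*&".toList)

-- min_index = max(1, int(hard_break * 0.6)).  For |hard_break| ≤ 2^31 and hard_break ≥ 0 the
-- truncated double product int(hard_break*0.6) equals ⌊3*hard_break/5⌋ (the accumulated rounding
-- error stays below half an ulp of the product, so no truncation boundary is crossed); for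
-- hard_break < 0 both values are ≤ 0 and max(1,·) yields 1 either way.  Exact on Dom.
def pyMinIndex (hard_break : Int) : Int := max 1 (PySem.Int.floordiv (3 * hard_break) 5)

-- the loop 'for idx in range(hard_break-1, min_index-1, -1): if text[idx] in …: return idx+1'
def softLoopA (cs : List Char) (idxs : List Int) (hard_break : Int) : Int :=
  match idxs with
  | [] => hard_break
  | idx :: rest =>
    if PySem.Set.contains softBreakChars (PySem.List.pyGetD cs idx ' ') then idx + 1
    else softLoopA cs rest hard_break

def prefer_soft_wrap_break_py (text : String) (hard_break : Int) : Int :=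
  if hard_break ≥ PySem.Str.len text then hard_break
  else
    let min_index := pyMinIndex hard_break
    softLoopA text.toList (PySem.List.pyRange (hard_break - 1) (min_index - 1) (-1)) hard_break

-- ===== PORT B =====
-- max(text.rfind(c, min_index, hard_break) for c in SOFT): every rfind is ≥ -1, so the max over
-- the nonempty set equals a fold of max started at -1 (order over the set irrelevant for max).
def prefer_soft_wrap_break_py_alt (text : String) (hard_break : Int) : Int :=
  if hard_break ≥ PySem.Str.len text then hard_break
  else
    let min_index := pyMinIndex hard_break
    if hard_break ≤ min_index then hard_break
    else
      let best := softBreakChars.foldl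
        (fun acc c => max acc (PySem.Str.rfindFrom text (String.ofList [c]) min_index (some hard_break)))
        (-1)
      if best ≥ 0 then best + 1 else hard_break

-- ===== PRECONDITION & SPEC =====
def Spec_prefer_soft_wrap_break_py (text : String) (hard_break : Int) (out : Int) : Prop := out = prefer_soft_wrap_break_py_alt text hard_break
instance (text : String) (hard_break : Int) (out : Int) : Decidable (Spec_prefer_soft_wrap_break_py text hard_break out) := by unfold Spec_prefer_soft_wrap_break_py; infer_instance

-- ===== CLAIM (what is proved, stated in full; the proofs are below) =====
def Claim_equal_prefer_soft_wrap_break_py : Prop := ∀ (text : String) (hard_break : Int), Dom_prefer_soft_wrap_break_py text hard_break → Spec_prefer_soft_wrap_break_py text hard_break (prefer_soft_wrap_break_py text hard_break)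

-- ===== LEMMAS AND PROOFS =====

theorem softLoopA_nil (cs : List Char) (hb : Int) : softLoopA cs [] hb = hb := rfl

theorem softLoopA_cons (cs : List Char) (i : Int) (rest : List Int) (hb : Int) :
    softLoopA cs (i :: rest) hb =
      if PySem.Set.contains softBreakChars (PySem.List.pyGetD cs i ' ') = true then i + 1
      else softLoopA cs rest hb := rfl

theorem rfind_go_zero (w sub : List Char) :
    PySem.Chars.rfind.go w sub 0 = if (sub.isPrefixOf (List.drop 0 w)) = true then 0 else -1 := rfl

theorem rfind_go_succ (w sub : List Char) (j : Nat) :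
    PySem.Chars.rfind.go w sub (j + 1) =
      if (sub.isPrefixOf (w.drop (j + 1))) = true then ((j : Int) + 1)
      else PySem.Chars.rfind.go w sub j := rfl

-- [c].isPrefixOf (w.drop j) means: j is in range and w[j] = c
theorem single_isPrefixOf_drop (w : List Char) (c : Char) (j : Nat) :
    ([c].isPrefixOf (w.drop j)) = true ↔ ∃ h : j < w.length, w[j] = c := by
  by_cases h : j < w.length
  · rw [List.drop_eq_getElem_cons h]
    simp [List.isPrefixOf, h, @eq_comm Char c]
  · rw [List.drop_eq_nil_of_le (by omega)]
    simp [List.isPrefixOf, h]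

-- rfind.go on a single-character needle: either no occurrence at index ≤ k, or it returns the
-- greatest occurrence index ≤ k
theorem rfind_go_single_spec (w : List Char) (c : Char) (k : Nat) :
    (PySem.Chars.rfind.go w [c] k = -1 ∧
      ∀ j : Nat, j ≤ k → ∀ h : j < w.length, w[j] ≠ c) ∨
    (∃ j : Nat, j ≤ k ∧ ∃ h : j < w.length, w[j] = c ∧
      PySem.Chars.rfind.go w [c] k = (j : Int) ∧
      ∀ j' : Nat, j < j' → j' ≤ k → ∀ h' : j' < w.length, w[j'] ≠ c) := by
  induction k with
  | zero =>
    by_cases hp : ([c].isPrefixOf (List.drop 0 w)) = true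
    · right
      obtain ⟨h0, hc⟩ := (single_isPrefixOf_drop w c 0).1 (by simpa using hp)
      exact ⟨0, le_refl _, h0, hc, by rw [rfind_go_zero, if_pos hp]; norm_num,
        by intro j' h1 h2 _ _; omega⟩
    · left
      refine ⟨by rw [rfind_go_zero, if_neg hp], ?_⟩
      intro j hj h hc
      have hj0 : j = 0 := by omega
      subst hj0
      exact hp ((single_isPrefixOf_drop w c 0).2 ⟨h, hc⟩)
  | succ k ih =>
    by_cases hp : ([c].isPrefixOf (w.drop (k + 1))) = true
    · right
      obtain ⟨h0, hc⟩ := (single_isPrefixOf_drop w c (k + 1)).1 hp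
      refine ⟨k + 1, le_refl _, h0, hc, ?_, ?_⟩
      · rw [rfind_go_succ, if_pos hp]; push_cast; ring
      · intro j' h1 h2 _ _; omega
    · have hstep : PySem.Chars.rfind.go w [c] (k + 1) = PySem.Chars.rfind.go w [c] k := by
        rw [rfind_go_succ, if_neg hp]
      rcases ih with ⟨hval, hnone⟩ | ⟨j, hjk, h, hc, hval, hmax⟩
      · left
        refine ⟨hstep ▸ hval, ?_⟩
        intro j hj hlt hc
        rcases Nat.lt_or_ge j (k + 1) with hlt' | hge
        · exact hnone j (by omega) hlt hc
        · have hje : j = k + 1 := by omega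
          subst hje
          exact hp ((single_isPrefixOf_drop w c (k + 1)).2 ⟨hlt, hc⟩)
      · right
        refine ⟨j, by omega, h, hc, hstep ▸ hval, ?_⟩
        intro j' hj' hle h' hc'
        rcases Nat.lt_or_ge j' (k + 1) with hlt' | hge
        · exact hmax j' hj' (by omega) h' hc'
        · have hje : j' = k + 1 := by omega
          subst hje
          exact hp ((single_isPrefixOf_drop w c (k + 1)).2 ⟨h', hc'⟩)

-- rfindFrom on the window [m, hb) of cs (with 1 ≤ m < hb < len cs): either -1 and no occurrence
-- of c in the window, or the greatest occurrence index in the window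
theorem rfindFrom_window_spec (cs : List Char) (c : Char) (m hb : Int)
    (hm : 1 ≤ m) (hmh : m < hb) (hhn : hb < (cs.length : Int)) :
    (PySem.Chars.rfindFrom cs [c] m (some hb) = -1 ∧
      ∀ i : Nat, m.toNat ≤ i → (i : Int) < hb → ∀ h : i < cs.length, cs[i] ≠ c) ∨
    (∃ i : Nat, m.toNat ≤ i ∧ (i : Int) < hb ∧ ∃ h : i < cs.length, cs[i] = c ∧
      PySem.Chars.rfindFrom cs [c] m (some hb) = (i : Int) ∧
      ∀ i' : Nat, i < i' → (i' : Int) < hb → ∀ h' : i' < cs.length, cs[i'] ≠ c) := by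
  have h0m : (0 : Int) ≤ m := by omega
  have h0h : (0 : Int) ≤ hb := by omega
  set w : List Char := (cs.take hb.toNat).drop m.toNat with hw
  have hwlen : w.length = hb.toNat - m.toNat := by
    simp [hw, List.length_drop, List.length_take]
    omega
  have hwget : ∀ j : Nat, (h : j < w.length) →
      ∃ h' : m.toNat + j < cs.length, w[j] = cs[m.toNat + j] := by
    intro j hj
    have hlt : m.toNat + j < cs.length := by omega
    refine ⟨hlt, ?_⟩
    simp [hw]
  have hred : PySem.Chars.rfindFrom cs [c] m (some hb) =
      if PySem.Chars.rfind.go w [c] w.length = -1 then -1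
      else m + PySem.Chars.rfind.go w [c] w.length := by
    simp only [PySem.Chars.rfindFrom, PySem.Chars.rfind]
    have h1 : ¬ ((cs.length : Int) < hb) := by omega
    have h2 : ¬ (hb < 0) := by omega
    have h3 : ¬ (m < 0) := by omega
    have h4 : ¬ (hb < m) := by omega
    simp [h1, h2, h3, h4, hw]
  rcases rfind_go_single_spec w c w.length with ⟨hval, hnone⟩ | ⟨j, _, h, hc, hval, hmax⟩
  · left
    refine ⟨by simp [hred, hval], ?_⟩
    intro i hi hilt hlt hic
    have hj : i - m.toNat < w.length := by omega
    obtain ⟨h', hw'⟩ := hwget (i - m.toNat) hj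
    have hgeq : cs[m.toNat + (i - m.toNat)]'h' = cs[i]'hlt := by congr 1; omega
    exact hnone (i - m.toNat) (by omega) hj (by rw [hw', hgeq]; exact hic)
  · right
    refine ⟨m.toNat + j, by omega, by omega, ?_, ?_, ?_, ?_⟩
    · omega
    · obtain ⟨h', hw'⟩ := hwget j h
      rw [← hw']; exact hc
    · rw [hred, hval]
      have hne : ¬ ((j : Int) = -1) := by omega
      simp [hne]
      omega
    · intro i' hi' hilt h' hic
      have hj' : i' - m.toNat < w.length := by omega
      obtain ⟨h'', hw''⟩ := hwget (i' - m.toNat) hj'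
      have hgeq : cs[m.toNat + (i' - m.toNat)]'h'' = cs[i']'h' := by congr 1; omega
      exact hmax (i' - m.toNat) (by omega) (by omega) hj' (by rw [hw'', hgeq]; exact hic)

-- fold-of-max facts
theorem foldl_max_ge (l : List Char) (f : Char → Int) (a : Int) :
    a ≤ l.foldl (fun acc c => max acc (f c)) a := by
  induction l generalizing a with
  | nil => exact le_refl a
  | cons x xs ih => exact le_trans (le_max_left a (f x)) (ih (max a (f x)))

theorem le_foldl_max (f : Char → Int) (c : Char) :
    ∀ (l : List Char) (a : Int), c ∈ l → f c ≤ l.foldl (fun acc c => max acc (f c)) a := by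
  intro l
  induction l with
  | nil => intro a hc; cases hc
  | cons x xs ih =>
    intro a hc
    rcases List.mem_cons.1 hc with rfl | hmem
    · exact le_trans (le_max_right a (f c)) (foldl_max_ge xs f _)
    · exact ih _ hmem

theorem foldl_max_cases (l : List Char) (f : Char → Int) (a : Int) :
    l.foldl (fun acc c => max acc (f c)) a = a ∨
    ∃ c ∈ l, l.foldl (fun acc c => max acc (f c)) a = f c := by
  induction l generalizing a with
  | nil => exact Or.inl rfl
  | cons x xs ih =>
    rcases ih (max a (f x)) with hv | ⟨c, hc, hv⟩
    · simp only [List.foldl_cons]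
      rcases max_cases a (f x) with ⟨he, _⟩ | ⟨he, _⟩
      · exact Or.inl (by rw [hv, he])
      · exact Or.inr ⟨x, List.mem_cons_self, by rw [hv, he]⟩
    · exact Or.inr ⟨c, List.mem_cons_of_mem _ hc, by simpa using hv⟩

-- A's backward loop over range(t, m-1, -1): hard_break when no soft char at an index in [m, t],
-- otherwise (greatest such index) + 1
theorem softLoopA_spec (cs : List Char) (hb m : Int) :
    ∀ k : Nat, ∀ t : Int, t = m - 1 + (k : Int) →
    (softLoopA cs (PySem.List.pyRange t (m - 1) (-1)) hb = hb ∧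
      ∀ i : Int, m ≤ i → i ≤ t → ¬ (PySem.Set.contains softBreakChars (PySem.List.pyGetD cs i ' ') = true)) ∨
    (∃ i : Int, m ≤ i ∧ i ≤ t ∧ PySem.Set.contains softBreakChars (PySem.List.pyGetD cs i ' ') = true ∧
      softLoopA cs (PySem.List.pyRange t (m - 1) (-1)) hb = i + 1 ∧
      ∀ j : Int, i < j → j ≤ t → ¬ (PySem.Set.contains softBreakChars (PySem.List.pyGetD cs j ' ') = true)) := by
  intro k
  induction k with
  | zero =>
    intro t ht
    left
    constructor
    · rw [PySem.List.pyRange_neg_one_eq_nil (by omega)]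
      rfl
    · intro i h1 h2; omega
  | succ k ih =>
    intro t ht
    rw [PySem.List.pyRange_neg_one_cons (by omega)]
    by_cases hs : PySem.Set.contains softBreakChars (PySem.List.pyGetD cs t ' ') = true
    · right
      exact ⟨t, by omega, le_refl t, hs, by rw [softLoopA_cons, if_pos hs],
        by intro j h1 h2; omega⟩
    · rw [softLoopA_cons, if_neg hs]
      rcases ih (t - 1) (by omega) with ⟨hval, hnone⟩ | ⟨i, h1, h2, h3, h4, h5⟩
      · left
        refine ⟨hval, ?_⟩
        intro i hi hle
        rcases lt_or_eq_of_le hle with hlt | rfl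
        · exact hnone i hi (by omega)
        · exact hs
      · right
        refine ⟨i, h1, by omega, h3, h4, ?_⟩
        intro j hj hle
        rcases lt_or_eq_of_le hle with hlt | rfl
        · exact h5 j hj (by omega)
        · exact hs

-- main equivalence
theorem main_equiv (text : String) (hard_break : Int) :
    prefer_soft_wrap_break_py text hard_break = prefer_soft_wrap_break_py_alt text hard_break := by
  unfold prefer_soft_wrap_break_py prefer_soft_wrap_break_py_alt
  set cs : List Char := text.toList with hcs
  have hlen : PySem.Str.len text = (cs.length : Int) := by
    simp [hcs]
  by_cases hg : hard_break ≥ PySem.Str.len text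
  · rw [if_pos hg, if_pos hg]
  · rw [if_neg hg, if_neg hg]
    simp only []
    set m : Int := pyMinIndex hard_break with hmdef
    have hm1 : 1 ≤ m := le_max_left 1 _
    by_cases hle : hard_break ≤ m
    · rw [if_pos hle, PySem.List.pyRange_neg_one_eq_nil (by omega), softLoopA_nil]
    · rw [if_neg hle]
      push_neg at hle hg
      have hhn : hard_break < (cs.length : Int) := by rw [← hlen]; exact hg
      set R : Char → Int := fun c =>
        PySem.Str.rfindFrom text (String.ofList [c]) m (some hard_break) with hR
      have hRchars : ∀ c, R c = PySem.Chars.rfindFrom cs [c] m (some hard_break) := by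
        intro c
        simp [hR, hcs]
      set best : Int := List.foldl (fun acc c => max acc (R c)) (-1) softBreakChars with hbest
      have hk : hard_break - 1 = m - 1 + (((hard_break - m).toNat : Nat) : Int) := by omega
      have hcontains_mem : ∀ ch : Char,
          PySem.Set.contains softBreakChars ch = true ↔ ch ∈ softBreakChars := by
        intro ch
        simp [PySem.Set.contains]
      rcases softLoopA_spec cs hard_break m (hard_break - m).toNat (hard_break - 1) hk with
        ⟨hval, hnone⟩ | ⟨i, h1, h2, h3, h4, h5⟩
      · -- no soft char in the window: every per-char rfind is -1, so best = -1
        have hRnone : ∀ c ∈ softBreakChars, R c = -1 := by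
          intro c hcmem
          rcases rfindFrom_window_spec cs c m hard_break hm1 hle hhn with
            ⟨hv, _⟩ | ⟨j, hj1, hj2, hjh, hjc, hjv, _⟩
          · rw [hRchars]; exact hv
          · exfalso
            apply hnone (j : Int) (by omega) (by omega)
            rw [PySem.List.pyGetD_eq_getElem cs ' ' (by omega) (by push_cast; omega)]
            have hjj : ((j : Int)).toNat = j := by omega
            simp only [hjj, hjc]
            exact (hcontains_mem c).2 hcmem
        have hbestval : best = -1 := by
          rcases foldl_max_cases softBreakChars R (-1) with hv | ⟨c, hc, hv⟩
          · rw [hbest, hv]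
          · rw [hbest, hv]; exact hRnone c hc
        rw [hval, hbestval]
        norm_num
      · -- greatest soft index i in the window: best = i, both results are i + 1
        have hi0 : (0 : Int) ≤ i := by omega
        have hilen : i < (cs.length : Int) := by omega
        have hitn : i.toNat < cs.length := by omega
        have hgetd : PySem.List.pyGetD cs i ' ' = cs[i.toNat]'hitn :=
          PySem.List.pyGetD_eq_getElem cs ' ' hi0 hilen
        have hc0mem : cs[i.toNat]'hitn ∈ softBreakChars := by
          apply (hcontains_mem _).1
          rw [← hgetd]; exact h3
        have hRc0 : R (cs[i.toNat]'hitn) = i := by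
          rw [hRchars]
          rcases rfindFrom_window_spec cs (cs[i.toNat]'hitn) m hard_break hm1 hle hhn with
            ⟨hv, hno⟩ | ⟨j, hj1, hj2, hjh, hjc, hjv, hjmax⟩
          · exact absurd rfl (hno i.toNat (by omega) (by omega) hitn)
          · have hji : (j : Int) ≤ i := by
              by_contra hgt
              push_neg at hgt
              apply h5 (j : Int) hgt (by omega)
              rw [PySem.List.pyGetD_eq_getElem cs ' ' (by omega) (by push_cast; omega)]
              have hjj : ((j : Int)).toNat = j := by omega
              simp only [hjj, hjc]
              exact (hcontains_mem _).2 hc0mem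
            have hij : i ≤ (j : Int) := by
              by_contra hgt
              push_neg at hgt
              exact absurd rfl (hjmax i.toNat (by omega) (by omega) hitn)
            rw [hjv]; omega
        have hbge : i ≤ best := by
          rw [hbest, ← hRc0]
          exact le_foldl_max R _ softBreakChars (-1) hc0mem
        have hble : best ≤ i := by
          rcases foldl_max_cases softBreakChars R (-1) with hv | ⟨c, hc, hv⟩
          · rw [hbest, hv]; omega
          · rw [hbest, hv]
            rcases rfindFrom_window_spec cs c m hard_break hm1 hle hhn with
              ⟨hv2, _⟩ | ⟨j, hj1, hj2, hjh, hjc, hjv, _⟩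
            · rw [hRchars, hv2]; omega
            · rw [hRchars, hjv]
              by_contra hgt
              push_neg at hgt
              apply h5 (j : Int) (by omega) (by omega)
              rw [PySem.List.pyGetD_eq_getElem cs ' ' (by omega) (by push_cast; omega)]
              have hjj : ((j : Int)).toNat = j := by omega
              simp only [hjj, hjc]
              exact (hcontains_mem c).2 hc
        have hbesti : best = i := le_antisymm hble hbge
        rw [h4, hbesti, if_pos (by omega : i ≥ 0)]

-- ===== VERDICT (by name: the statement is the Claim_ definition above) =====
theorem prefer_soft_wrap_break_py_spec : Claim_equal_prefer_soft_wrap_break_py := by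
  intro text hard_break _
  unfold Spec_prefer_soft_wrap_break_py
  exact main_equiv text hard_break
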